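-- pv_equiv track=rewrite | github.com/clinta715/midimaster | analyzers/dnb_reference_analyzer.py | drum_class_for_pitch
-- ===== SOURCE A (Python) =====
-- from typing import Any, Dict, List, Optional, Tuple, Iterable, Set
--
-- DRUM_CLASSES: Dict[str, Set[int]] = {
--     "kick": {35, 36},  # Acoustic/Electric Bass Drum
--     "snare": {38, 40},  # Acoustic/Electric Snare
--     "chh": {42, 44},  # Closed HH, Pedal HH
--     "ohh": {46},  # Open HH
--     "ride": {51, 59, 53},  # Ride1, RideCymbal2, RideBell (approx)
--     "crash": {49, 57, 55, 52},  # Crash1, Crash2, Splash, Chinese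
--     "tom": {41, 43, 45, 47, 48, 50},  # Toms
--     "perc": {37, 39},  # Side stick, Clap
--     # Others like shakers/cabasa/cowbell could be added if present
-- }
--
-- def drum_class_for_pitch(pitch: int) -> Optional[str]:
--     for cls, ps in DRUM_CLASSES.items():
--         if pitch in ps:
--             return cls
--     # Fallback rough mapping for out-of-GM cases
--     if 35 <= pitch <= 36:
--         return "kick"
--     if 37 <= pitch <= 41:
--         return "snare"
--     if 42 <= pitch <= 46:
--         return "chh" if pitch in (42, 44) else "ohh"
--     if 47 <= pitch <= 59:
--         return "tom"
--     return None
-- ===== SOURCE B (Python) =====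
-- DRUM_CLASSES = {
--     "kick": {35, 36},
--     "snare": {38, 40},
--     "chh": {42, 44},
--     "ohh": {46},
--     "ride": {51, 59, 53},
--     "crash": {49, 57, 55, 52},
--     "tom": {41, 43, 45, 47, 48, 50},
--     "perc": {37, 39},
-- }
--
-- # Flat lookup table built once at import: explicit class pitches first (first
-- # class listed wins), then the fallback ranges fill only still-missing pitches.
-- PITCH_TO_CLASS = {}
-- for _cls, _ps in DRUM_CLASSES.items():
--     for _p in sorted(_ps):
--         PITCH_TO_CLASS.setdefault(_p, _cls)
-- for _p in range(35, 60):
--     if _p not in PITCH_TO_CLASS: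
--         if _p <= 36:
--             _c = "kick"
--         elif _p <= 41:
--             _c = "snare"
--         elif _p <= 46:
--             _c = "chh" if _p in (42, 44) else "ohh"
--         else:
--             _c = "tom"
--         PITCH_TO_CLASS[_p] = _c
--
-- def drum_class_for_pitch(pitch):
--     return PITCH_TO_CLASS.get(pitch)
-- ===== Notes on version B (the rewrite author's own statement) =====
-- stated objective: simpler
-- what changed: Replaces the per-call loop over DRUM_CLASSES plus the fallback if-chain with one flat dict PITCH_TO_CLASS built once at import (explicit entries first, fallback ranges fill the gaps), so the function body is a single dict .get.
import Mathlib
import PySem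

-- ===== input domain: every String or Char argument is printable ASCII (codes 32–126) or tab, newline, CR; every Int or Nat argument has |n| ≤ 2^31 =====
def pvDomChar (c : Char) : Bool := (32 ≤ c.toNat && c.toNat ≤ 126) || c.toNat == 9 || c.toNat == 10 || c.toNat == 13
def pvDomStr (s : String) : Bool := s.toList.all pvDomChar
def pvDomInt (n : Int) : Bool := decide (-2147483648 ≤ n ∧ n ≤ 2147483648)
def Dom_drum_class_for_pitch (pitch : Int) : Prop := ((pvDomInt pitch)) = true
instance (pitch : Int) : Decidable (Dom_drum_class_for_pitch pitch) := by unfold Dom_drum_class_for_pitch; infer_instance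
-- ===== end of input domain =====

-- B builds one flat pitch→class table at import time and looks it up; A scans the class dict and falls through an if-chain. Objective: simpler per-call logic; return value proved identical on the whole Int domain.
-- ===== PORT A =====
def DRUM_CLASSES : List (String × PySem.Set Int) :=
  [("kick", PySem.Set.ofList [35, 36]),
   ("snare", PySem.Set.ofList [38, 40]),
   ("chh", PySem.Set.ofList [42, 44]),
   ("ohh", PySem.Set.ofList [46]),
   ("ride", PySem.Set.ofList [51, 59, 53]),
   ("crash", PySem.Set.ofList [49, 57, 55, 52]),
   ("tom", PySem.Set.ofList [41, 43, 45, 47, 48, 50]),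
   ("perc", PySem.Set.ofList [37, 39])]

-- the 'for cls, ps in DRUM_CLASSES.items(): if pitch in ps: return cls' loop
def drumLoop (pitch : Int) : List (String × PySem.Set Int) → Option String
  | [] => none
  | (cls, ps) :: rest => if pitch ∈ ps then some cls else drumLoop pitch rest

def drum_class_for_pitch (pitch : Int) : Option String :=
  match drumLoop pitch DRUM_CLASSES with
  | some cls => some cls
  | none =>
    if 35 ≤ pitch ∧ pitch ≤ 36 then some "kick"
    else if 37 ≤ pitch ∧ pitch ≤ 41 then some "snare"
    else if 42 ≤ pitch ∧ pitch ≤ 46 then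
      (if pitch = 42 ∨ pitch = 44 then some "chh" else some "ohh")
    else if 47 ≤ pitch ∧ pitch ≤ 59 then some "tom"
    else none

-- ===== PORT B =====
-- explicit pitches first: setdefault keeps the first class that lists a pitch
def pitchTableExplicit : PySem.Dict Int String :=
  DRUM_CLASSES.foldl
    (fun d cs =>
      (PySem.List.sorted cs.2 (fun x => x)).foldl
        (fun d p => if (PySem.Dict.get? d p).isSome then d else PySem.Dict.insert d p cs.1) d)
    (PySem.Dict.mk [])

-- fallback ranges fill only pitches not already present
def PITCH_TO_CLASS : PySem.Dict Int String :=
  (PySem.List.pyRange 35 60 1).foldl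
    (fun d p =>
      if (PySem.Dict.get? d p).isSome then d
      else PySem.Dict.insert d p
        (if p ≤ 36 then "kick"
         else if p ≤ 41 then "snare"
         else if p ≤ 46 then (if p = 42 ∨ p = 44 then "chh" else "ohh")
         else "tom"))
    pitchTableExplicit

def drum_class_for_pitch_alt (pitch : Int) : Option String :=
  PySem.Dict.get? PITCH_TO_CLASS pitch

-- ===== PRECONDITION & SPEC =====
def Spec_drum_class_for_pitch (pitch : Int) (out : Option String) : Prop := out = drum_class_for_pitch_alt pitch
instance (pitch : Int) (out : Option String) : Decidable (Spec_drum_class_for_pitch pitch out) := by unfold Spec_drum_class_for_pitch; infer_instance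

-- ===== CLAIM (what is proved, stated in full; the proofs are below) =====
def Claim_equal_drum_class_for_pitch : Prop := ∀ (pitch : Int), Dom_drum_class_for_pitch pitch → Spec_drum_class_for_pitch pitch (drum_class_for_pitch pitch)

-- ===== LEMMAS AND PROOFS =====

set_option maxRecDepth 8000
set_option maxHeartbeats 1000000

theorem both_none_outside (pitch : Int) (h : pitch < 35 ∨ 59 < pitch) :
    drum_class_for_pitch pitch = none ∧ drum_class_for_pitch_alt pitch = none := by
  constructor
  · have hl : drumLoop pitch DRUM_CLASSES = none := by
      simp only [DRUM_CLASSES, drumLoop, PySem.Set.ofList]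
      split_ifs <;> simp_all <;> omega
    simp only [drum_class_for_pitch, hl]
    split_ifs <;> first | rfl | omega
  · have hT : PITCH_TO_CLASS = PySem.Dict.mk
      [(35, "kick"), (36, "kick"), (38, "snare"), (40, "snare"), (42, "chh"),
       (44, "chh"), (46, "ohh"), (51, "ride"), (53, "ride"), (59, "ride"),
       (49, "crash"), (52, "crash"), (55, "crash"), (57, "crash"), (41, "tom"),
       (43, "tom"), (45, "tom"), (47, "tom"), (48, "tom"), (50, "tom"),
       (37, "perc"), (39, "perc"), (54, "tom"), (56, "tom"), (58, "tom")] := by decide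
    rw [drum_class_for_pitch_alt, hT]; clear hT
    simp only [PySem.Dict.get?_mk_cons, beq_iff_eq]
    repeat rw [if_neg (by omega)]
    simp [PySem.Dict.get?]

theorem eq_inside (pitch : Int) (h1 : 35 ≤ pitch) (h2 : pitch ≤ 59) :
    drum_class_for_pitch pitch = drum_class_for_pitch_alt pitch := by
  interval_cases pitch <;> decide

-- ===== VERDICT (by name: the statement is the Claim_ definition above) =====
theorem drum_class_for_pitch_spec : Claim_equal_drum_class_for_pitch := by
  intro pitch _
  unfold Spec_drum_class_for_pitch
  by_cases h1 : 35 ≤ pitch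
  · by_cases h2 : pitch ≤ 59
    · exact eq_inside pitch h1 h2
    · have h := both_none_outside pitch (Or.inr (by omega))
      rw [h.1, h.2]
  · have h := both_none_outside pitch (Or.inl (by omega))
    rw [h.1, h.2]
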